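-- pv_equiv track=rewrite | github.com/Hybin/AutoAnnotator | src/utils.py | cut_pairs
-- ===== SOURCE A (Python) =====
-- def cut_pairs(pairs):
--     """
--     cut the pairs by the second value
--     :param pairs: list of pairs
--     :return: list of pairs
--     """
--     whole, part = [], []
--
--     for item, label in pairs:
--         if len(part) == 0:
--             part = [(item, label)]
--         else:
--             if part[0][1] == label:
--                 part.append((item, label))
--             else:
--                 whole.append(part)
--                 part = [(item, label)]
--
--         continue
--
--     return whole
-- ===== SOURCE B (Python) =====
-- def cut_pairs(pairs):
--     """
--     cut the pairs by the second value
--     :param pairs: list of pairs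
--     :return: list of pairs
--     """
--     groups = []
--     i, n = 0, len(pairs)
--     while i < n:
--         head_label = pairs[i][1]
--         k = i + 1
--         while k < n and pairs[k][1] == head_label:
--             k += 1
--         groups.append(pairs[i:k])
--         i = k
--     return groups[:-1]
-- ===== Notes on version B (the rewrite author's own statement) =====
-- stated objective: alternative
-- what changed: Replaced A's single accumulator loop carrying (whole, part) state by a recursive run-extraction: each step scans off one maximal run of equal labels and recurses on the remainder, then the last run is dropped with a slice.
import Mathlib
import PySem

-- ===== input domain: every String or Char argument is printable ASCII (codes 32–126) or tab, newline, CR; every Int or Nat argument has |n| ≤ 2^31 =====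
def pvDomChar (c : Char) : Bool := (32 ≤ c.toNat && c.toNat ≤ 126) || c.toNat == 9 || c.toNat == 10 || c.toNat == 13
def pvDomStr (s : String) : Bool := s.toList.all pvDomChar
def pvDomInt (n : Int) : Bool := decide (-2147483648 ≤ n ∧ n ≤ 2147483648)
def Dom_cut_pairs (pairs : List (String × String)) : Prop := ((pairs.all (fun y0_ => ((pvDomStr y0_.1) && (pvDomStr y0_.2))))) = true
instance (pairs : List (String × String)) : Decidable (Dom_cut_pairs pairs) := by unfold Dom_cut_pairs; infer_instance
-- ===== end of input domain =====

-- B replaces A's stateful accumulator loop by recursive extraction of maximal runs followed by dropping the last run; same behaviour, different decomposition.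

-- ===== PORT A =====
-- one loop step: part empty → start new part; same label (vs part[0][1]) → append; else ship part
def cpStep (s : List (List (String × String)) × List (String × String))
    (p : String × String) : List (List (String × String)) × List (String × String) :=
  match s.2 with
  | [] => (s.1, [p])
  | q :: _ => if q.2 == p.2 then (s.1, s.2 ++ [p]) else (s.1 ++ [s.2], [p])

def cut_pairs (pairs : List (String × String)) : List (List (String × String)) :=
  (pairs.foldl cpStep ([], [])).1

-- ===== PORT B =====
-- the run-extraction loop of Source B as structural recursion: the index i becomes the suffix pairs[i:], the inner scan to k is takeWhile/dropWhile, one maximal run per step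
def cpGroups : List (String × String) → List (List (String × String))
  | [] => []
  | p :: rest =>
      (p :: rest.takeWhile (fun q => q.2 == p.2)) ::
        cpGroups (rest.dropWhile (fun q => q.2 == p.2))
termination_by l => l.length
decreasing_by
  exact Nat.lt_succ_of_le (List.length_dropWhile_le _ _)

def cut_pairs_alt (pairs : List (String × String)) : List (List (String × String)) :=
  (cpGroups pairs).dropLast

-- ===== PRECONDITION & SPEC =====
def Spec_cut_pairs (pairs : List (String × String)) (out : List (List (String × String))) : Prop := out = cut_pairs_alt pairs
instance (pairs : List (String × String)) (out : List (List (String × String))) : Decidable (Spec_cut_pairs pairs out) := by unfold Spec_cut_pairs; infer_instance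

-- ===== CLAIM (what is proved, stated in full; the proofs are below) =====
def Claim_equal_cut_pairs : Prop := ∀ (pairs : List (String × String)), Dom_cut_pairs pairs → Spec_cut_pairs pairs (cut_pairs pairs)

-- ===== LEMMAS AND PROOFS =====

-- scanning a run: all of t matches, b does not → takeWhile/dropWhile cut exactly at b
lemma takeWhile_run (t l : List (String × String)) (b : String × String) (lab : String)
    (ht : ∀ x ∈ t, x.2 = lab) (hb : ¬ b.2 = lab) :
    (t ++ b :: l).takeWhile (fun q => q.2 == lab) = t ∧
    (t ++ b :: l).dropWhile (fun q => q.2 == lab) = b :: l := by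
  induction t with
  | nil => simp [hb]
  | cons x t ih =>
      have hx : x.2 = lab := ht x (by simp)
      have ih' := ih (fun y hy => ht y (by simp [hy]))
      simp [hx, ih'.1, ih'.2]

-- a nonempty all-equal-label list is one single run
lemma cpGroups_run (t : List (String × String)) (q : String × String)
    (ht : ∀ x ∈ t, x.2 = q.2) : cpGroups (q :: t) = [q :: t] := by
  have h1 : t.takeWhile (fun x => x.2 == q.2) = t :=
    List.takeWhile_eq_self_iff.mpr (by intro x hx; simp [ht x hx])
  have h2 : t.dropWhile (fun x => x.2 == q.2) = [] :=
    List.dropWhile_eq_nil_iff.mpr (by intro x hx; simp [ht x hx])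
  simp [cpGroups, h1, h2]

-- main loop invariant: folding the rest of the input from state (whole, q :: t)
-- (current part nonempty, labels all equal to the part head's) produces
-- whole ++ the non-final runs of (q :: t ++ l)
lemma foldA_eq (l : List (String × String)) :
    ∀ (t : List (String × String)) (q : String × String)
      (whole : List (List (String × String))),
      (∀ x ∈ t, x.2 = q.2) →
      (l.foldl cpStep (whole, q :: t)).1 =
        whole ++ (cpGroups (q :: (t ++ l))).dropLast := by
  induction l with
  | nil =>
      intro t q whole ht
      simp [cpGroups_run t q ht]
  | cons b l ih =>
      intro t q whole ht
      by_cases hqb : q.2 = b.2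
      · have hstep : cpStep (whole, q :: t) b = (whole, q :: (t ++ [b])) := by
          simp [cpStep, hqb]
        have ht' : ∀ x ∈ t ++ [b], x.2 = q.2 := by
          intro x hx
          rcases List.mem_append.mp hx with h | h
          · exact ht x h
          · simp at h; simp [h, hqb]
        have := ih (t ++ [b]) q whole ht'
        simp only [List.foldl_cons, hstep, this, List.append_assoc, List.cons_append,
          List.nil_append]
      · have hstep : cpStep (whole, q :: t) b = (whole ++ [q :: t], [b]) := by
          simp [cpStep, hqb]
        have hcut := takeWhile_run t l b q.2 ht (fun h => hqb h.symm)
        have hsplit : cpGroups (q :: (t ++ b :: l)) = (q :: t) :: cpGroups (b :: l) := by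
          simp [cpGroups, hcut.1, hcut.2]
        have hne : cpGroups (b :: l) ≠ [] := by simp [cpGroups]
        have := ih [] b (whole ++ [q :: t]) (by simp)
        simp only [List.foldl_cons, hstep, List.nil_append] at this ⊢
        rw [this, hsplit, List.dropLast_cons_of_ne_nil hne, List.append_assoc]
        simp

-- ===== VERDICT (by name: the statement is the Claim_ definition above) =====
theorem cut_pairs_spec : Claim_equal_cut_pairs := by
  intro pairs _
  unfold Spec_cut_pairs cut_pairs cut_pairs_alt
  cases pairs with
  | nil => simp [cpGroups]
  | cons p l =>
      have hstep : cpStep ([], []) p = ([], [p]) := by simp [cpStep]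
      simpa [List.foldl_cons, hstep] using foldA_eq l [] p [] (by simp)
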